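-- pv_equiv track=rewrite | github.com/agnostiQ/DQC1-knots | utils.py | traceGetCount
-- ===== SOURCE A (Python) =====
-- def getComputationalBasis(n):
--     """
--     Returns a dictionary with computational basis
--     in lexicographical ordering, for n qubits.
--     """
--     myDict = {}
--     for i in range(2**n):
--         word = ''
--         for j in range(n):
--             word = word + str((i//(2**j))%2)
--         myDict[word] = 0
--
--     return myDict
--
-- def traceGetCount(countDict, i):
--     """
--     Takes counts dictionary from IBM QPU.
--     Returns counts for qubit(s) i, with others traced out.
--     """
--     dim = len(i)
--     myDict = getComputationalBasis(dim)
--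
--     for j in countDict:
--         shortKey = ''
--         for k in i:
--             shortKey = shortKey + j[k]
--
--         myDict[shortKey] += countDict[j]
--
--     return myDict
-- ===== SOURCE B (Python) =====
-- def traceGetCount(countDict, i):
--     """
--     Takes counts dictionary from IBM QPU.
--     Returns counts for qubit(s) i, with others traced out.
--     """
--     # Recursively built basis (LSB-first), and a gather: for each basis key,
--     # scan countDict and sum the entries whose projection onto i matches it.
--     def basis(n):
--         if n == 0:
--             return ['']
--         return [d + w for w in basis(n - 1) for d in '01']
--     return {key: sum(c for s, c in countDict.items()
--                      if all(s[k] == ch for k, ch in zip(i, key)))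
--             for key in basis(len(i))}
-- ===== Notes on version B (the rewrite author's own statement) =====
-- stated objective: alternative
-- what changed: A scatters: it pre-builds the full 2^dim basis dict with keys made by repeated integer division and accumulates each measurement into it in place; B gathers: it builds the basis recursively (basis(n) prefixes '0'/'1' onto basis(n-1)) and computes each output count by scanning countDict and summing the entries whose projection onto i matches that key, with no accumulator dict or mutation at all.
-- outside the precondition, e.g. on traceGetCount({'2': 5}, [0]): A raises KeyError, B returns {'0': 0, '1': 0}; on traceGetCount({'0': 5}, [3]): A raises IndexError, B raises IndexError
import Mathlib
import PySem

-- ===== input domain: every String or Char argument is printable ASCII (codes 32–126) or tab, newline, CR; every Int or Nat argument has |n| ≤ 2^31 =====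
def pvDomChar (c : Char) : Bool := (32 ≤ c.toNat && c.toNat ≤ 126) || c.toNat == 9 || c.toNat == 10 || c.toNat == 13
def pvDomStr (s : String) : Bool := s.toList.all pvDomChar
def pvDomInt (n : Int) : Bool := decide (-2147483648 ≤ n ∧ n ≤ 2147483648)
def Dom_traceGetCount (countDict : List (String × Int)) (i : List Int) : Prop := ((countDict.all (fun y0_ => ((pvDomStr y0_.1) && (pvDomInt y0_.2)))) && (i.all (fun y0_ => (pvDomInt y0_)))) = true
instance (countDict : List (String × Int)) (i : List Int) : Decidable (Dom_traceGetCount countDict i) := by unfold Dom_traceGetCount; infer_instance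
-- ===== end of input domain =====

-- B replaces A's scatter (pre-build the full 2^dim basis dict, accumulate each entry into it
-- in place) by a gather (recursive basis construction; each output count is the sum over the
-- countDict entries whose projection matches that key); objective: alternative.

-- ===== PORT A =====
-- inner loop of getComputationalBasis: word = word + str((i//(2**j))%2)  (string as List Char)
def pvBasisWord (n : Nat) (iIdx : Int) : List Char :=
  (PySem.List.pyRange 0 (n : Int) 1).foldl
    (fun w j => w ++ PySem.Int.toChars (PySem.Int.mod (PySem.Int.floordiv iIdx ((2 : Int) ^ j.toNat)) 2)) []

def getComputationalBasisP (n : Nat) : PySem.Dict String Int :=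
  (PySem.List.pyRange 0 ((2 : Int) ^ n) 1).foldl
    (fun d iIdx => d.insert (String.ofList (pvBasisWord n iIdx)) 0) PySem.Dict.empty

def traceGetCount (countDict : List (String × Int)) (i : List Int) : List (String × Int) :=
  let dim := i.length
  let myDict := getComputationalBasisP dim
  (countDict.foldl
    (fun d p =>
      -- shortKey = shortKey + j[k]; Python raises IndexError where pyGet? is none (excluded by Pre_)
      let shortKey := String.ofList (i.foldl (fun s k => s ++ [(PySem.Str.pyGet? p.1 k).getD ' ']) [])
      -- myDict[shortKey] += countDict[j]; Python raises KeyError in the none branch (excluded by Pre_)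
      match d.get? shortKey with
      | some v => d.insert shortKey (v + (PySem.Dict.get? (PySem.Dict.mk countDict) p.1).getD 0)
      | none => d)
    myDict).items

-- ===== PORT B =====
-- basis(n): [''] if n == 0 else [d + w for w in basis(n-1) for d in '01']
def pvBasisRec : Nat → List (List Char)
  | 0 => [[]]
  | n + 1 => (pvBasisRec n).flatMap (fun w => ['0' :: w, '1' :: w])

-- all(s[k] == ch for k, ch in zip(i, key)); Python raises IndexError where pyGet? is none (excluded by Pre_)
def pvMatch (s : String) (i : List Int) (key : List Char) : Bool :=
  (i.zip key).all (fun kc => ((PySem.Str.pyGet? s kc.1).getD ' ') == kc.2)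

def traceGetCount_alt (countDict : List (String × Int)) (i : List Int) : List (String × Int) :=
  (pvBasisRec i.length).map (fun key =>
    (String.ofList key,
     (countDict.map (fun p => if pvMatch p.1 i key then p.2 else 0)).sum))

-- ===== PRECONDITION & SPEC =====
-- Pre_ excludes (a) assoc lists with duplicate keys, which do not represent a Python dict
-- (countDict is a dict, so its keys are unique), and (b) the inputs where A raises: an IndexError
-- when some j[k] is out of range, or a KeyError when some projected character is not '0'/'1'.
def Pre_traceGetCount (countDict : List (String × Int)) (i : List Int) : Prop :=
  (countDict.map Prod.fst).Nodup ∧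
  ∀ p ∈ countDict, ∀ k ∈ i,
    ((PySem.Str.pyGet? p.1 k).any (fun c => c == '0' || c == '1')) = true
instance (countDict : List (String × Int)) (i : List Int) : Decidable (Pre_traceGetCount countDict i) := by
  unfold Pre_traceGetCount; infer_instance

def pvWitness_traceGetCount : (List (String × Int)) × List Int := ([("01", 3), ("10", 2)], [0])

def Spec_traceGetCount (countDict : List (String × Int)) (i : List Int) (out : List (String × Int)) : Prop := out = traceGetCount_alt countDict i
instance (countDict : List (String × Int)) (i : List Int) (out : List (String × Int)) : Decidable (Spec_traceGetCount countDict i out) := by unfold Spec_traceGetCount; infer_instance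

-- ===== CLAIM (what is proved, stated in full; the proofs are below) =====
def Claim_equal_traceGetCount : Prop := ∀ (countDict : List (String × Int)) (i : List Int), Dom_traceGetCount countDict i → Pre_traceGetCount countDict i → Spec_traceGetCount countDict i (traceGetCount countDict i)

-- ===== LEMMAS AND PROOFS =====

-- the character of bit b of m, LSB first (the common normal form of both key constructions)
def pvBitChar (m b : Nat) : Char := if (m >>> b) &&& 1 ≠ 0 then '1' else '0'

def pvKeyChars (n m : Nat) : List Char := (List.range n).map (pvBitChar m)

-- decode a binary word (LSB first) back to its index
def pvDec : List Char → Nat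
  | [] => 0
  | c :: cs => (if c = '1' then 1 else 0) + 2 * pvDec cs

theorem pvDec_spec (cs : List Char) (h : ∀ c ∈ cs, c = '0' ∨ c = '1') :
    pvDec cs < 2 ^ cs.length ∧ pvKeyChars cs.length (pvDec cs) = cs := by
  induction cs with
  | nil => simp [pvDec, pvKeyChars]
  | cons c cs ih =>
    obtain ⟨ih1, ih2⟩ := ih (fun x hx => h x (by simp [hx]))
    set b0 : Nat := if c = '1' then 1 else 0 with hb0
    have hb0lt : b0 < 2 := by rw [hb0]; split <;> omega
    constructor
    · simp only [pvDec, List.length_cons, pow_succ]; omega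
    · rw [pvKeyChars, List.length_cons, List.range_succ_eq_map, List.map_cons, List.map_map]
      have hhead : pvBitChar (pvDec (c :: cs)) 0 = c := by
        simp only [pvBitChar, pvDec, Nat.shiftRight_zero, Nat.and_one_is_mod, ← hb0]
        have h2 : (b0 + 2 * pvDec cs) % 2 = b0 := by omega
        rw [h2]
        rcases h c (by simp) with hc | hc <;> simp [hc, hb0]
      have htail : ∀ b : Nat, (pvDec (c :: cs) >>> (b + 1)) = pvDec cs >>> b := by
        intro b
        simp only [pvDec, ← hb0, Nat.shiftRight_eq_div_pow, pow_succ]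
        have h2 : (b0 + 2 * pvDec cs) / 2 = pvDec cs := by omega
        rw [show 2 ^ b * 2 = 2 * 2 ^ b by ring, ← Nat.div_div_eq_div_mul, h2]
      rw [hhead]
      congr 1
      calc List.map (pvBitChar (pvDec (c :: cs)) ∘ Nat.succ) (List.range cs.length)
          = List.map (pvBitChar (pvDec cs)) (List.range cs.length) :=
            List.map_congr_left (fun b _ => by simp [Function.comp, pvBitChar, htail b])
        _ = cs := ih2

theorem pvBasisWord_eq (n m : Nat) : pvBasisWord n (m : Int) = pvKeyChars n m := by
  unfold pvBasisWord pvKeyChars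
  rw [PySem.List.pyRange_zero_natCast, List.foldl_map,
      PySem.List.foldl_append_eq_flatMap, List.nil_append]
  have key : ∀ y : Nat,
      PySem.Int.toChars (PySem.Int.mod (PySem.Int.floordiv (m : Int) ((2:Int) ^ ((y : Int)).toNat)) 2)
        = [pvBitChar m y] := by
    intro y
    have h2 : ((2:Int) ^ ((y : Int)).toNat) = ((2 ^ y : Nat) : Int) := by push_cast; rfl
    rw [h2, PySem.Int.floordiv_natCast]
    rw [show ((2:Int)) = ((2 : Nat) : Int) from rfl, PySem.Int.mod_natCast]
    rw [pvBitChar, Nat.and_one_is_mod, Nat.shiftRight_eq_div_pow]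
    rcases Nat.mod_two_eq_zero_or_one (m / 2 ^ y) with h | h <;> simp [h] <;> rfl
  rw [funext key, ← List.map_eq_flatMap]

theorem pvKeyChars_inj (n : Nat) : ∀ m m' : Nat, m < 2 ^ n → m' < 2 ^ n →
    pvKeyChars n m = pvKeyChars n m' → m = m' := by
  intro m m' hm hm' heq
  apply Nat.eq_of_testBit_eq
  intro b
  by_cases hb : b < n
  · have h0 := congrArg (fun l => l[b]?) heq
    simp only [pvKeyChars, List.getElem?_map, List.getElem?_range, hb, Option.map_some] at h0
    rw [Nat.testBit_eq_decide_div_mod_eq, Nat.testBit_eq_decide_div_mod_eq]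
    simp only [pvBitChar, Nat.and_one_is_mod, Nat.shiftRight_eq_div_pow] at h0
    split_ifs at h0 with hA hB <;> simp_all
  · have h1 : Nat.testBit m b = false := by
      apply Nat.testBit_eq_false_of_lt
      calc m < 2 ^ n := hm
        _ ≤ 2 ^ b := Nat.pow_le_pow_right (by norm_num) (by omega)
    have h2 : Nat.testBit m' b = false := by
      apply Nat.testBit_eq_false_of_lt
      calc m' < 2 ^ n := hm'
        _ ≤ 2 ^ b := Nat.pow_le_pow_right (by norm_num) (by omega)
    rw [h1, h2]

theorem pvKeys_nodup (n : Nat) :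
    ((List.range (2 ^ n)).map (fun m => String.ofList (pvKeyChars n m))).Nodup := by
  apply (List.nodup_range).map_on
  intro m hm m' hm' heq
  apply pvKeyChars_inj n m m' (List.mem_range.mp hm) (List.mem_range.mp hm')
  simpa using congrArg String.toList heq

theorem basis_items (n : Nat) :
    (getComputationalBasisP n).items
      = (List.range (2 ^ n)).map (fun m => (String.ofList (pvKeyChars n m), 0)) := by
  unfold getComputationalBasisP
  rw [show ((2:Int) ^ n) = ((2 ^ n : Nat) : Int) by push_cast; rfl]
  rw [PySem.List.pyRange_zero_natCast, List.foldl_map]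
  simp only [fun m : Nat => congrArg String.ofList (pvBasisWord_eq n m)]
  rw [PySem.Dict.items_foldl_insert_fresh _ _ _ _ (by intro a _; exact PySem.Dict.contains_empty _)
      (pvKeys_nodup n)]
  simp [PySem.Dict.empty]

theorem basis_keys (n : Nat) :
    (getComputationalBasisP n).keys = (List.range (2 ^ n)).map (fun m => String.ofList (pvKeyChars n m)) := by
  show (getComputationalBasisP n).items.map Prod.fst = _
  rw [basis_items]; simp

theorem getD_foldl_insert_add {α : Type} (l : List α) (pkf : α → String) (cf : α → Int)
    (d : PySem.Dict String Int) (k : String) :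
    (l.foldl (fun d p => d.insert (pkf p) (d.getD (pkf p) 0 + cf p)) d).getD k 0
      = d.getD k 0 + (l.map (fun p => if pkf p = k then cf p else 0)).sum := by
  induction l generalizing d with
  | nil => simp
  | cons p l ih =>
    simp only [List.foldl_cons, List.map_cons, List.sum_cons, ih, PySem.Dict.getD_insert]
    by_cases h : k = pkf p
    · simp [h]; ring
    · have h2 : ¬ pkf p = k := fun hh => h hh.symm
      simp [h, h2]

theorem keys_foldl_insert_same {α : Type} (l : List α) (pkf : α → String) (cf : α → Int)
    (d : PySem.Dict String Int) (hmem : ∀ p ∈ l, pkf p ∈ d.keys) :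
    (l.foldl (fun d p => d.insert (pkf p) (d.getD (pkf p) 0 + cf p)) d).keys = d.keys := by
  induction l generalizing d with
  | nil => rfl
  | cons p l ih =>
    have hc : d.contains (pkf p) = true := by
      rw [PySem.Dict.contains_iff_mem_keys]; exact hmem p (by simp)
    have hk := PySem.Dict.keys_insert_of_contains d (d.getD (pkf p) 0 + cf p) hc
    simp only [List.foldl_cons]
    rw [ih _ (by intro q hq; rw [hk]; exact hmem q (by simp [hq]))]
    exact hk

theorem A_fold {α : Type} (l : List α) (pkf : α → String) (cf : α → Int)
    (d : PySem.Dict String Int) (hmem : ∀ p ∈ l, pkf p ∈ d.keys) :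
    (l.foldl (fun d p => match d.get? (pkf p) with
        | some v => d.insert (pkf p) (v + cf p)
        | none => d) d)
      = l.foldl (fun d p => d.insert (pkf p) (d.getD (pkf p) 0 + cf p)) d := by
  induction l generalizing d with
  | nil => rfl
  | cons p l ih =>
    have hc : d.contains (pkf p) = true := by
      rw [PySem.Dict.contains_iff_mem_keys]; exact hmem p (by simp)
    have hs : (d.get? (pkf p)).isSome := by rw [← PySem.Dict.contains_eq_isSome_get?]; exact hc
    obtain ⟨v, hv⟩ := Option.isSome_iff_exists.mp hs
    have hgd : d.getD (pkf p) 0 = v := PySem.Dict.getD_of_get?_eq_some d 0 hv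
    have hk := PySem.Dict.keys_insert_of_contains d (d.getD (pkf p) 0 + cf p) hc
    simp only [List.foldl_cons, hv, hgd]
    exact ih _ (by intro q hq; rw [hgd] at hk; rw [hk]; exact hmem q (by simp [hq]))

-- B-side: the recursively built basis is the indexed basis
theorem range_two_mul_flatMap (N : Nat) :
    List.range (2 * N) = (List.range N).flatMap (fun k => [2 * k, 2 * k + 1]) := by
  induction N with
  | zero => simp
  | succ N ih =>
    rw [show 2 * (N + 1) = (2 * N + 1) + 1 by ring, List.range_succ, List.range_succ,
        List.range_succ, List.flatMap_append, ← ih]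
    simp

theorem pvKeyChars_double (n m : Nat) (d : Nat) (hd : d < 2) :
    pvKeyChars (n + 1) (2 * m + d) = (if d = 1 then '1' else '0') :: pvKeyChars n m := by
  rw [pvKeyChars, List.range_succ_eq_map, List.map_cons, List.map_map]
  have hhead : pvBitChar (2 * m + d) 0 = (if d = 1 then '1' else '0') := by
    simp only [pvBitChar, Nat.shiftRight_zero, Nat.and_one_is_mod]
    have : (2 * m + d) % 2 = d := by omega
    rw [this]
    interval_cases d <;> simp
  have htail : ∀ b : Nat, (2 * m + d) >>> (b + 1) = m >>> b := by
    intro b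
    simp only [Nat.shiftRight_eq_div_pow, pow_succ]
    have h2 : (2 * m + d) / 2 = m := by omega
    rw [show 2 ^ b * 2 = 2 * 2 ^ b by ring, ← Nat.div_div_eq_div_mul, h2]
  rw [hhead]
  congr 1
  exact List.map_congr_left (fun b _ => by simp [Function.comp, pvBitChar, htail b])

theorem pvBasisRec_eq (n : Nat) : pvBasisRec n = (List.range (2 ^ n)).map (pvKeyChars n) := by
  induction n with
  | zero => simp [pvBasisRec, pvKeyChars]
  | succ n ih =>
    rw [pvBasisRec, ih, show 2 ^ (n + 1) = 2 * 2 ^ n by ring, range_two_mul_flatMap,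
        List.flatMap_map, List.map_flatMap]
    exact List.flatMap_congr (fun m _ => by
      have h0 : pvKeyChars (n + 1) (2 * m) = '0' :: pvKeyChars n m := by
        simpa using pvKeyChars_double n m 0 (by omega)
      have h1 : pvKeyChars (n + 1) (2 * m + 1) = '1' :: pvKeyChars n m := by
        simpa using pvKeyChars_double n m 1 (by omega)
      simp [h0, h1])

-- B's zipped pointwise comparison is projection equality (for keys of the right length)
theorem pvMatch_iff (s : String) (i : List Int) (key : List Char) (hlen : key.length = i.length) :
    pvMatch s i key = true ↔ i.map (fun k => (PySem.Str.pyGet? s k).getD ' ') = key := by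
  induction i generalizing key with
  | nil => cases key with
    | nil => simp [pvMatch]
    | cons c cs => simp at hlen
  | cons k i ih =>
    cases key with
    | nil => simp at hlen
    | cons c cs =>
      simp only [pvMatch, List.zip_cons_cons, List.all_cons, List.map_cons, Bool.and_eq_true,
        beq_iff_eq, List.cons.injEq]
      rw [← ih cs (by simpa using hlen)]
      rfl

-- ===== VERDICT (by name: the statement is the Claim_ definition above) =====
theorem traceGetCount_spec : Claim_equal_traceGetCount := by
  intro cd i _ hpre
  obtain ⟨hnd, hbin⟩ := hpre
  unfold Spec_traceGetCount traceGetCount traceGetCount_alt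
  set n := i.length with hn
  set pkf : String × Int → String :=
    fun p => String.ofList (i.map (fun k => (PySem.Str.pyGet? p.1 k).getD ' ')) with hpkf
  set cf : String × Int → Int :=
    fun p => (PySem.Dict.get? (PySem.Dict.mk cd) p.1).getD 0 with hcf
  -- each projected key is binary of length n, hence a basis key
  have hmem : ∀ p ∈ cd, pkf p ∈ (getComputationalBasisP n).keys := by
    intro p hp
    have hb : ∀ c ∈ i.map (fun k => (PySem.Str.pyGet? p.1 k).getD ' '), c = '0' ∨ c = '1' := by
      intro c hc
      obtain ⟨k, hk, hck⟩ := List.mem_map.mp hc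
      have := hbin p hp k hk
      obtain ⟨c', hc', hbc⟩ : ∃ c', PySem.Str.pyGet? p.1 k = some c' ∧ (c' == '0' || c' == '1') = true := by
        cases hh : PySem.Str.pyGet? p.1 k with
        | none => rw [hh] at this; simp [Option.any] at this
        | some a => exact ⟨a, rfl, by rw [hh] at this; simpa [Option.any] using this⟩
      rw [hc'] at hck
      simp only [Option.getD_some] at hck
      subst hck
      rcases Bool.or_eq_true_iff.mp hbc with h | h
      · left; exact (beq_iff_eq.mp h)
      · right; exact (beq_iff_eq.mp h)
    obtain ⟨hlt, hmap⟩ := pvDec_spec _ hb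
    rw [basis_keys]
    apply List.mem_map.mpr
    refine ⟨pvDec (i.map (fun k => (PySem.Str.pyGet? p.1 k).getD ' ')), ?_, ?_⟩
    · apply List.mem_range.mpr; simpa [hn] using hlt
    · simp only [hpkf]
      congr 1
      simpa [hn] using hmap
  -- rewrite A's loop body into the insert shape and fold
  have hshort : ∀ p : String × Int,
      String.ofList (i.foldl (fun s k => s ++ [(PySem.Str.pyGet? p.1 k).getD ' ']) []) = pkf p := by
    intro p
    rw [PySem.List.foldl_append_singleton_eq_map, List.nil_append]
  simp only [hshort]
  rw [A_fold cd pkf cf _ hmem]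
  -- keys of the final dict, and their Nodup
  have hkeys := keys_foldl_insert_same cd pkf cf (getComputationalBasisP n) hmem
  have hndk : (getComputationalBasisP n).keys.Nodup := by
    rw [basis_keys]; exact pvKeys_nodup n
  -- items of the final dict as a map over the basis keys
  rw [PySem.Dict.items_eq_map_keys _ (by rw [hkeys]; exact hndk) 0]
  rw [hkeys, basis_keys, pvBasisRec_eq, List.map_map, List.map_map]
  apply List.map_congr_left
  intro m hm
  have hbase : (getComputationalBasisP n).getD (String.ofList (pvKeyChars n m)) 0 = 0 := by
    apply PySem.Dict.getD_of_mem_items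
    · rw [basis_items]; exact List.mem_map.mpr ⟨m, hm, rfl⟩
    · exact hndk
  simp only [Function.comp]
  rw [getD_foldl_insert_add, hbase, zero_add]
  refine Prod.ext rfl ?_
  show (cd.map (fun p => if pkf p = String.ofList (pvKeyChars n m) then cf p else 0)).sum
      = (cd.map (fun p => if pvMatch p.1 i (pvKeyChars n m) then p.2 else 0)).sum
  congr 1
  apply List.map_congr_left
  intro p hp
  have hcfp : cf p = p.2 := by
    rw [hcf]
    have : (PySem.Dict.mk cd).get? p.1 = some p.2 :=
      PySem.Dict.get?_of_mem_items (PySem.Dict.mk cd) (by simpa using hp)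
        (by simpa [PySem.Dict.keys] using hnd)
    simp [this]
  have hcond : (pkf p = String.ofList (pvKeyChars n m)) ↔ pvMatch p.1 i (pvKeyChars n m) = true := by
    rw [pvMatch_iff p.1 i (pvKeyChars n m) (by simp [pvKeyChars, hn])]
    constructor
    · intro h; simpa [hpkf] using congrArg String.toList h
    · intro h; exact congrArg String.ofList h
  by_cases h : pvMatch p.1 i (pvKeyChars n m) = true
  · rw [if_pos (hcond.mpr h), if_pos h, hcfp]
  · rw [if_neg (fun hh => h (hcond.mp hh)), if_neg h]
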